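-- pv_equiv track=rewrite | github.com/andres21feli/ST0245-002 | laboratorios/lab01/ejercicioEnLinea/Recursion2.py | GroupSum5
-- ===== SOURCE A (Python) =====
-- def GroupSum5(nums, target, start=0):
--     if start >= len(nums):                                      # c0
--         if target == 0:                                         # c1
--             return True                                         # c2
--         else:                                                   # c3
--             return False                                        # c4
--
--     if nums[start]%5 == 0:                                      # c5
--         return GroupSum5(nums, target-nums[start], start + 1)   # T(n) = c6 + T(n-1)
--
--     if nums[start-1]%5 == 0 and nums[start] == 1:               # c7
--         return GroupSum5(nums, target, start + 1)               # T(n) = c8 + T(n-1)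
--
--
--     return GroupSum5(nums, target, start + 1) or GroupSum5(nums, target-nums[start], start + 1)
-- ===== SOURCE B (Python) =====
-- def GroupSum5(nums, target, start=0):
--     # Sparse DP: build the set of achievable sums over positions start..len-1,
--     # scanning right-to-left, then test membership.
--     sums = {0}
--     for i in reversed(range(start, len(nums))):
--         x = nums[i]
--         if x % 5 == 0:
--             sums = {s + x for s in sums}
--         elif nums[i - 1] % 5 == 0 and x == 1:
--             pass
--         else:
--             sums |= {s + x for s in sums}
--     return target in sums
-- ===== Notes on version B (the rewrite author's own statement) =====
-- stated objective: alternative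
-- what changed: Replaces A's exponential branching recursion by a sparse dynamic program: one right-to-left pass maintaining the set of achievable sums (duplicates collapse), then a single membership test; Pre_ only excludes inputs where both programs raise IndexError (start below -len(nums), or at -len(nums) when the first element forces a look at nums[start-1]).
import Mathlib
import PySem

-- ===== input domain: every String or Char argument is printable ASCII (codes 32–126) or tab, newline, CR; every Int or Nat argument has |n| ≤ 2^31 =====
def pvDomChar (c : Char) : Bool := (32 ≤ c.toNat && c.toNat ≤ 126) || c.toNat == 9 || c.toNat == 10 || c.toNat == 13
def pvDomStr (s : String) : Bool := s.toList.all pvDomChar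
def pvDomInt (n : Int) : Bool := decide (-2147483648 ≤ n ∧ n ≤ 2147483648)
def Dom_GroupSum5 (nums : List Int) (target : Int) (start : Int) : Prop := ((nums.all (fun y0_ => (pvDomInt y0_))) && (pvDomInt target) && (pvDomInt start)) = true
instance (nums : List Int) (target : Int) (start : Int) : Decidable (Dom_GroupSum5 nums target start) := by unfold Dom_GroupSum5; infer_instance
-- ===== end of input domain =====

-- B replaces A's exponential branching recursion by one right-to-left pass that
-- maintains the SET of achievable sums, then tests membership (alternative algorithm).

-- ===== PORT A =====
def GroupSum5 (nums : List Int) (target : Int) (start : Int) : Bool :=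
  if _h : (nums.length : Int) ≤ start then target == 0
  else
    match PySem.List.pyGet? nums start with
    | none => false                                    -- Python raises IndexError here; excluded by Pre_
    | some x =>
      if PySem.Int.mod x 5 == 0 then
        GroupSum5 nums (target - x) (start + 1)
      else
        match PySem.List.pyGet? nums (start - 1) with
        | none => false                                -- Python raises IndexError here; excluded by Pre_
        | some p =>
          if PySem.Int.mod p 5 == 0 && x == 1 then
            GroupSum5 nums target (start + 1)
          else
            GroupSum5 nums target (start + 1) || GroupSum5 nums (target - x) (start + 1)
termination_by (nums.length - start).toNat
decreasing_by all_goals omega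

-- ===== PORT B =====
-- one loop step of Source B's for-loop (the loop body, sums := step sums i)
def GroupSum5_alt_step (nums : List Int) (sums : PySem.Set Int) (i : Int) : PySem.Set Int :=
  match PySem.List.pyGet? nums i with
  | none => sums                                       -- Python raises IndexError here; excluded by Pre_
  | some x =>
    if PySem.Int.mod x 5 == 0 then
      PySem.Set.ofList (sums.map (· + x))
    else
      match PySem.List.pyGet? nums (i - 1) with
      | none => sums                                   -- Python raises IndexError here; excluded by Pre_
      | some p =>
        if PySem.Int.mod p 5 == 0 && x == 1 then sums
        else PySem.Set.union sums (PySem.Set.ofList (sums.map (· + x)))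

def GroupSum5_alt (nums : List Int) (target : Int) (start : Int) : Bool :=
  let sums : PySem.Set Int :=
    ((PySem.List.pyRange start (nums.length : Int) 1).reverse).foldl
      (GroupSum5_alt_step nums) (PySem.Set.ofList [0])
  PySem.Set.contains sums target

-- ===== PRECONDITION & SPEC =====
-- Pre_ excludes exactly the inputs on which the Python (both A and B) raises IndexError:
-- start < -len(nums) while start < len(nums), or start = -len(nums) with nums[0] % 5 ≠ 0
-- (then nums[start-1] is accessed and is out of range).
def Pre_GroupSum5 (nums : List Int) (target : Int) (start : Int) : Prop :=
  (nums.length : Int) ≤ start ∨ 1 - (nums.length : Int) ≤ start ∨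
    (start = -(nums.length : Int) ∧ PySem.Int.mod (nums.headD 0) 5 = 0)
instance (nums : List Int) (target : Int) (start : Int) : Decidable (Pre_GroupSum5 nums target start) := by
  unfold Pre_GroupSum5; infer_instance

def pvWitness_GroupSum5 : List Int × Int × Int := ([5, 1, 2], 3, 0)

def Spec_GroupSum5 (nums : List Int) (target : Int) (start : Int) (out : Bool) : Prop := out = GroupSum5_alt nums target start
instance (nums : List Int) (target : Int) (start : Int) (out : Bool) : Decidable (Spec_GroupSum5 nums target start out) := by unfold Spec_GroupSum5; infer_instance

-- ===== CLAIM (what is proved, stated in full; the proofs are below) =====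
def Claim_equal_GroupSum5 : Prop := ∀ (nums : List Int) (target : Int) (start : Int), Dom_GroupSum5 nums target start → Pre_GroupSum5 nums target start → Spec_GroupSum5 nums target start (GroupSum5 nums target start)

-- ===== LEMMAS AND PROOFS =====

-- All index accesses from position s on are in range (invariant preserved by s ↦ s+1).
def SafeFrom (nums : List Int) (s : Int) : Prop :=
  -(nums.length : Int) ≤ s ∧ (s = -(nums.length : Int) → PySem.Int.mod (nums.headD 0) 5 = 0)

-- the set of sums achievable from position s to the end, with A's selection rules
def Gset (nums : List Int) (s : Int) : List Int :=
  if _h : (nums.length : Int) ≤ s then [0]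
  else
    match PySem.List.pyGet? nums s with
    | none => Gset nums (s + 1)
    | some x =>
      if PySem.Int.mod x 5 == 0 then (Gset nums (s + 1)).map (· + x)
      else
        match PySem.List.pyGet? nums (s - 1) with
        | none => Gset nums (s + 1)
        | some p =>
          if PySem.Int.mod p 5 == 0 && x == 1 then Gset nums (s + 1)
          else Gset nums (s + 1) ++ (Gset nums (s + 1)).map (· + x)
termination_by (nums.length - s).toNat
decreasing_by all_goals omega

lemma pyGet?_isSome_of_range (nums : List Int) (i : Int)
    (h1 : -(nums.length : Int) ≤ i) (h2 : i < (nums.length : Int)) :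
    ∃ x, PySem.List.pyGet? nums i = some x := by
  have hne : PySem.List.pyGet? nums i ≠ none := by
    intro hn
    rw [PySem.List.pyGet?_eq_none_iff] at hn
    exact hn ⟨h1, h2⟩
  cases hx : PySem.List.pyGet? nums i with
  | none => exact absurd hx hne
  | some x => exact ⟨x, rfl⟩

lemma A_mem_Gset (nums : List Int) :
    ∀ (k : Nat) (s t : Int), (nums.length - s).toNat ≤ k → SafeFrom nums s →
      (GroupSum5 nums t s = true ↔ t ∈ Gset nums s) := by
  intro k
  induction k with
  | zero =>
    intro s t hk _
    have hle : (nums.length : Int) ≤ s := by omega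
    rw [GroupSum5, Gset]
    simp [hle]
  | succ k ih =>
    intro s t hk hsafe
    obtain ⟨hs1, hs2⟩ := hsafe
    by_cases hle : (nums.length : Int) ≤ s
    · rw [GroupSum5, Gset]; simp [hle]
    · have hlt : s < (nums.length : Int) := by omega
      obtain ⟨x, hx⟩ := pyGet?_isSome_of_range nums s hs1 hlt
      have hk' : (nums.length - (s + 1)).toNat ≤ k := by omega
      have hsafe' : SafeFrom nums (s + 1) := ⟨by omega, by intro h; exact absurd h (by omega)⟩
      rw [GroupSum5, Gset]
      simp only [hle, dite_false, hx]
      by_cases h5 : PySem.Int.mod x 5 == 0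
      · simp only [h5, if_true]
        rw [ih (s + 1) (t - x) hk' hsafe']
        constructor
        · intro hm; exact List.mem_map.mpr ⟨t - x, hm, by ring⟩
        · intro hm
          obtain ⟨y, hy, hyx⟩ := List.mem_map.mp hm
          have : y = t - x := by omega
          exact this ▸ hy
      · -- need nums[s-1] in range: s ≠ -len since nums[-len] = nums[0] is a multiple of 5 when s = -len
        have hsne : s ≠ -(nums.length : Int) := by
          intro hse
          apply h5
          have hx0 : PySem.List.pyGet? nums s = some (nums.headD 0) := by
            have hlen : 0 < nums.length := by omega
            subst hse
            rw [show -(nums.length : Int) = -((nums.length : Nat) : Int) from rfl]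
            rw [PySem.List.pyGet?_neg_natCast nums nums.length hlen (le_refl _)]
            simp
            cases nums with
            | nil => simp at hlen
            | cons a l => simp
          rw [hx] at hx0
          have hxh : x = nums.headD 0 := by injection hx0
          have := hs2 hse
          rw [hxh]
          exact beq_iff_eq.mpr this
        obtain ⟨p, hp⟩ := pyGet?_isSome_of_range nums (s - 1) (by omega) (by omega)
        simp only [h5, Bool.false_eq_true, hp]
        by_cases hskip : PySem.Int.mod p 5 == 0 && x == 1
        · simp only [hskip, if_true]
          exact ih (s + 1) t hk' hsafe'
        · simp only [hskip, Bool.false_eq_true, if_false]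
          rw [Bool.or_eq_true, ih (s + 1) t hk' hsafe', ih (s + 1) (t - x) hk' hsafe',
            List.mem_append]
          constructor
          · rintro (hm | hm)
            · exact Or.inl hm
            · exact Or.inr (List.mem_map.mpr ⟨t - x, hm, by ring⟩)
          · rintro (hm | hm)
            · exact Or.inl hm
            · obtain ⟨y, hy, hyx⟩ := List.mem_map.mp hm
              have : y = t - x := by omega
              exact Or.inr (this ▸ hy)

lemma step_mem (nums : List Int) (S : PySem.Set Int) (i : Int) (G : List Int)
    (hIH : ∀ t, t ∈ S ↔ t ∈ G) :
    ∀ t, t ∈ GroupSum5_alt_step nums S i ↔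
      t ∈ (match PySem.List.pyGet? nums i with
          | none => G
          | some x =>
            if PySem.Int.mod x 5 == 0 then G.map (· + x)
            else
              match PySem.List.pyGet? nums (i - 1) with
              | none => G
              | some p =>
                if PySem.Int.mod p 5 == 0 && x == 1 then G
                else G ++ G.map (· + x)) := by
  intro t
  unfold GroupSum5_alt_step
  cases hx : PySem.List.pyGet? nums i with
  | none => exact hIH t
  | some x =>
    by_cases h5 : PySem.Int.mod x 5 == 0
    · simp only [h5, if_true]
      rw [PySem.Set.mem_ofList, List.mem_map, List.mem_map]
      constructor
      · rintro ⟨y, hy, hyx⟩; exact ⟨y, (hIH y).mp hy, hyx⟩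
      · rintro ⟨y, hy, hyx⟩; exact ⟨y, (hIH y).mpr hy, hyx⟩
    · simp only [h5, Bool.false_eq_true, if_false]
      cases hp : PySem.List.pyGet? nums (i - 1) with
      | none => exact hIH t
      | some p =>
        by_cases hskip : PySem.Int.mod p 5 == 0 && x == 1
        · simp only [hskip, if_true]; exact hIH t
        · simp only [hskip, Bool.false_eq_true, if_false]
          rw [PySem.Set.mem_union, PySem.Set.mem_ofList, List.mem_append, List.mem_map,
            List.mem_map]
          constructor
          · rintro (hm | ⟨y, hy, hyx⟩)
            · exact Or.inl ((hIH t).mp hm)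
            · exact Or.inr ⟨y, (hIH y).mp hy, hyx⟩
          · rintro (hm | ⟨y, hy, hyx⟩)
            · exact Or.inl ((hIH t).mpr hm)
            · exact Or.inr ⟨y, (hIH y).mpr hy, hyx⟩

lemma B_mem_Gset (nums : List Int) :
    ∀ (k : Nat) (s t : Int), (nums.length - s).toNat ≤ k →
      (t ∈ ((PySem.List.pyRange s (nums.length : Int) 1).reverse).foldl
            (GroupSum5_alt_step nums) (PySem.Set.ofList [0]) ↔
        t ∈ Gset nums s) := by
  intro k
  induction k with
  | zero =>
    intro s t hk
    have hle : (nums.length : Int) ≤ s := by omega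
    rw [PySem.List.pyRange_one_eq_nil hle, Gset]
    simp [hle, PySem.Set.ofList]
  | succ k ih =>
    intro s t hk
    by_cases hle : (nums.length : Int) ≤ s
    · rw [PySem.List.pyRange_one_eq_nil hle, Gset]
      simp [hle, PySem.Set.ofList]
    · have hlt : s < (nums.length : Int) := by omega
      have hk' : (nums.length - (s + 1)).toNat ≤ k := by omega
      rw [PySem.List.pyRange_one_cons hlt, List.foldl_reverse, List.foldr_cons,
        ← List.foldl_reverse]
      have := step_mem nums
        (((PySem.List.pyRange (s + 1) (nums.length : Int) 1).reverse).foldl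
          (GroupSum5_alt_step nums) (PySem.Set.ofList [0])) s
        (Gset nums (s + 1)) (fun u => ih (s + 1) u hk') t
      rw [this]
      conv_rhs => rw [Gset, dif_neg hle]

-- ===== VERDICT (by name: the statement is the Claim_ definition above) =====
theorem GroupSum5_spec : Claim_equal_GroupSum5 := by
  intro nums target start _hdom hpre
  unfold Spec_GroupSum5 GroupSum5_alt
  have hsafe : SafeFrom nums start := by
    rcases hpre with h | h | ⟨h1, h2⟩
    · refine ⟨by omega, ?_⟩
      intro he
      have : nums.length = 0 := by omega
      have hnil : nums = [] := List.length_eq_zero_iff.mp this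
      subst hnil
      decide
    · exact ⟨by omega, by intro he; omega⟩
    · exact ⟨by omega, fun _ => h2⟩
  have hA := A_mem_Gset nums (nums.length - start).toNat start target (le_refl _) hsafe
  have hB := B_mem_Gset nums (nums.length - start).toNat start target (le_refl _)
  rw [Bool.eq_iff_iff, hA, PySem.Set.contains_iff, hB]
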